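-- pv_equiv track=rewrite | github.com/jordisans/AdventOfCode | 2019/day4/day4.py | HasRepeatedNumberPart1
-- ===== SOURCE A (Python) =====
-- def HasRepeatedNumberPart1(password):
--     compareTo = "-1"
--     for digit in password:
--         if compareTo == digit:
--             return True
--         else:
--             compareTo = digit
--     return False
-- ===== SOURCE B (Python) =====
-- def HasRepeatedNumberPart1(password):
--     # Run-length decomposition: collect maximal runs of equal characters,
--     # then check whether any run is at least two long.
--     runs = []
--     for x in password:
--         if runs and runs[-1][0] == x:
--             runs[-1][1] += 1
--         else:
--             runs.append([x, 1])
--     return any(n >= 2 for _, n in runs)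
-- ===== Notes on version B (the rewrite author's own statement) =====
-- stated objective: alternative
-- what changed: Replaces A's previous/current sentinel comparison loop with a run-length decomposition: the input is split into maximal runs of equal characters and the result is whether any run has length >= 2.
import Mathlib
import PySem

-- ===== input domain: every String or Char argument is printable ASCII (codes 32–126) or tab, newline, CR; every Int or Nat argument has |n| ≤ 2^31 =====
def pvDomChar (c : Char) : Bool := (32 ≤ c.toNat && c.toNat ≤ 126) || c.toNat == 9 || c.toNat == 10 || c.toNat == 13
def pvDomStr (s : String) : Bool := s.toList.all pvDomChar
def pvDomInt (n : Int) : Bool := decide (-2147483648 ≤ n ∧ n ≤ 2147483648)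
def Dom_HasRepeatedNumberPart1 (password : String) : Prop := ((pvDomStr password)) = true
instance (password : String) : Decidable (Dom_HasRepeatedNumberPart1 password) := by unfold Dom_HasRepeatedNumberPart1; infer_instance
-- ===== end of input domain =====

-- B replaces A's previous/current comparison loop with a run-length decomposition (alternative structure, same O(n) result; not faster).
-- ===== PORT A =====
-- Python iterates the string with a String sentinel "-1" compared against 1-char strings;
-- ported over List Char: the sentinel is the char list ['-','1'], each digit the list [c] (exact).
def pvALoop : List Char → List Char → Bool
  | _, [] => false
  | cmp, c :: rest => if cmp = [c] then true else pvALoop [c] rest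

def HasRepeatedNumberPart1 (password : String) : Bool := pvALoop ['-', '1'] password.toList

-- ===== PORT B =====
-- one iteration of Source B's loop: extend the last run (runs[-1][1] += 1) or append a new run
def pvStep (runs : List (Char × Nat)) (x : Char) : List (Char × Nat) :=
  match runs.getLast? with
  | some (d, n) => if d = x then runs.dropLast ++ [(x, n + 1)] else runs ++ [(x, 1)]
  | none => [(x, 1)]

def HasRepeatedNumberPart1_alt (password : String) : Bool :=
  (password.toList.foldl pvStep []).any (fun g => decide (2 ≤ g.2))

-- ===== PRECONDITION & SPEC =====
def Spec_HasRepeatedNumberPart1 (password : String) (out : Bool) : Prop := out = HasRepeatedNumberPart1_alt password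
instance (password : String) (out : Bool) : Decidable (Spec_HasRepeatedNumberPart1 password out) := by unfold Spec_HasRepeatedNumberPart1; infer_instance

-- ===== CLAIM (what is proved, stated in full; the proofs are below) =====
def Claim_equal_HasRepeatedNumberPart1 : Prop := ∀ (password : String), Dom_HasRepeatedNumberPart1 password → Spec_HasRepeatedNumberPart1 password (HasRepeatedNumberPart1 password)

-- ===== LEMMAS AND PROOFS =====
-- proof-only mirror of pvStep that keeps the most recent run at the FRONT of the list
def pvConsStep (runs : List (Char × Nat)) (x : Char) : List (Char × Nat) :=
  match runs with
  | (d, n) :: r => if d = x then (x, n + 1) :: r else (x, 1) :: (d, n) :: r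
  | [] => [(x, 1)]

lemma pvStep_reverse (rs : List (Char × Nat)) (x : Char) :
    (pvStep rs x).reverse = pvConsStep rs.reverse x := by
  rcases h : rs.getLast? with _ | ⟨d, n⟩
  · rw [List.getLast?_eq_none_iff] at h
    subst h; rfl
  · obtain ⟨l, rfl⟩ : ∃ l, rs = l ++ [(d, n)] := by
      rcases List.getLast?_eq_some_iff.mp h with ⟨l, hl⟩
      exact ⟨l, hl⟩
    simp only [pvStep, h, pvConsStep, List.reverse_append, List.reverse_cons,
      List.reverse_nil, List.nil_append, List.cons_append, List.dropLast_concat]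
    by_cases hdx : d = x <;> simp [hdx]

lemma pvFold_reverse (l : List Char) : ∀ (rs : List (Char × Nat)),
    (List.foldl pvStep rs l).reverse = List.foldl pvConsStep rs.reverse l := by
  induction l with
  | nil => intro rs; rfl
  | cons x t ih => intro rs; simp only [List.foldl_cons, ih, pvStep_reverse]

lemma pvALoop_nil (cmp : List Char) : pvALoop cmp [] = false := rfl

lemma pvALoop_cons (cmp : List Char) (c : Char) (rest : List Char) :
    pvALoop cmp (c :: rest) = if cmp = [c] then true else pvALoop [c] rest := rfl

-- loop invariant for the front-of-list fold: a long head run, a long earlier run,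
-- or A's loop primed with the head run's char
lemma pvFold_invariant (l : List Char) : ∀ (c : Char) (m : Nat) (r : List (Char × Nat)), 1 ≤ m →
    (List.foldl pvConsStep ((c, m) :: r) l).any (fun g => decide (2 ≤ g.2)) =
      (decide (2 ≤ m) || r.any (fun g => decide (2 ≤ g.2)) || pvALoop [c] l) := by
  induction l with
  | nil => intro c m r _; simp [pvALoop_nil]
  | cons x t ih =>
    intro c m r hm
    simp only [List.foldl_cons]
    by_cases h : c = x
    · rw [show pvConsStep ((c, m) :: r) x = (x, m + 1) :: r from by simp [pvConsStep, h],
        ih x (m + 1) r (by omega), pvALoop_cons, if_pos (by rw [h])]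
      simp [show 2 ≤ m + 1 from by omega]
    · rw [show pvConsStep ((c, m) :: r) x = (x, 1) :: (c, m) :: r from by simp [pvConsStep, h],
        ih x 1 ((c, m) :: r) (le_refl 1), pvALoop_cons, if_neg (by simp [h])]
      simp [Bool.or_assoc]

-- ===== VERDICT (by name: the statement is the Claim_ definition above) =====
theorem HasRepeatedNumberPart1_spec : Claim_equal_HasRepeatedNumberPart1 := by
  intro password _
  show HasRepeatedNumberPart1 password = HasRepeatedNumberPart1_alt password
  unfold HasRepeatedNumberPart1 HasRepeatedNumberPart1_alt
  rw [← List.any_reverse, pvFold_reverse]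
  cases h : password.toList with
  | nil => rfl
  | cons c t =>
    rw [show List.foldl pvConsStep [].reverse (c :: t) = List.foldl pvConsStep [(c, 1)] t from rfl,
      pvFold_invariant t c 1 [] (le_refl 1), pvALoop_cons,
      if_neg (by simp : ¬(['-', '1'] = [c]))]
    simp
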